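-- pv_equiv track=rewrite | github.com/randyarbolaez/codesignal | daily-challenges/countVowelConsonant.py | countVowelConsonant
-- ===== SOURCE A (Python) =====
-- def countVowelConsonant(s):
--   count = 0
--   vowelList = ['a','e','i','o','u']
--
--   for i in s:
--     if i in vowelList:
--       count += 1
--     else:
--       count += 2
--
--   return count;
-- ===== SOURCE B (Python) =====
-- def countVowelConsonant(s):
--     vowels = sum(1 for c in s if c in {'a', 'e', 'i', 'o', 'u'})
--     return 2 * len(s) - vowels
-- ===== Notes on version B (the rewrite author's own statement) =====
-- stated objective: simpler
-- what changed: Replaces the per-character 1/2 branching accumulator with a single vowel tally and the closed form 2*len(s) - vowels (one sum over a set membership instead of a branching loop).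
import Mathlib
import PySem

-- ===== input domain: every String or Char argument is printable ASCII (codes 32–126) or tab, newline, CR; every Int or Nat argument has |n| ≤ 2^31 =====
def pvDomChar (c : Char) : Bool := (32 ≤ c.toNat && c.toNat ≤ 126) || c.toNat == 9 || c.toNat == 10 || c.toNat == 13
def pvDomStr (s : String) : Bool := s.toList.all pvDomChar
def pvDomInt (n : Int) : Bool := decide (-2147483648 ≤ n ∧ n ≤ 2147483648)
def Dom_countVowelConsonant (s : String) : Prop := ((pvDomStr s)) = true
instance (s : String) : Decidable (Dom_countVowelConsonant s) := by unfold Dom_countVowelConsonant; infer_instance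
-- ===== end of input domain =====

-- B counts only vowels and returns the closed form 2*len(s) - vowels (simpler decomposition).

-- ===== PORT A =====
-- A: loop over the characters, adding 1 for a lowercase vowel and 2 otherwise.
def countVowelConsonant (s : String) : Int :=
  s.toList.foldl (fun count i =>
    if i ∈ ['a', 'e', 'i', 'o', 'u'] then count + 1 else count + 2) 0

-- ===== PORT B =====
-- B: tally the vowels once, then return 2*len(s) - vowels.
def countVowelConsonant_alt (s : String) : Int :=
  let vowels : Int :=
    (s.toList.filter (fun c => c ∈ ['a', 'e', 'i', 'o', 'u'])).length
  2 * (s.toList.length : Int) - vowels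

-- ===== PRECONDITION & SPEC =====
def Spec_countVowelConsonant (s : String) (out : Int) : Prop := out = countVowelConsonant_alt s
instance (s : String) (out : Int) : Decidable (Spec_countVowelConsonant s out) := by unfold Spec_countVowelConsonant; infer_instance

-- ===== CLAIM (what is proved, stated in full; the proofs are below) =====
def Claim_equal_countVowelConsonant : Prop := ∀ (s : String), Dom_countVowelConsonant s → Spec_countVowelConsonant s (countVowelConsonant s)

-- ===== LEMMAS AND PROOFS =====
theorem pv_fold_eq (l : List Char) (acc : Int) :
    l.foldl (fun count i =>
      if i ∈ ['a', 'e', 'i', 'o', 'u'] then count + 1 else count + 2) acc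
    = acc + 2 * (l.length : Int)
        - ((l.filter (fun c => c ∈ ['a', 'e', 'i', 'o', 'u'])).length : Int) := by
  induction l generalizing acc with
  | nil => simp
  | cons h t ih =>
    by_cases hv : h ∈ ['a', 'e', 'i', 'o', 'u']
    · rw [List.foldl_cons, if_pos hv, ih, List.filter_cons_of_pos (by simpa using hv)]
      push_cast [List.length_cons]; ring
    · rw [List.foldl_cons, if_neg hv, ih, List.filter_cons_of_neg (by simpa using hv)]
      push_cast [List.length_cons]; ring

-- ===== VERDICT (by name: the statement is the Claim_ definition above) =====
theorem countVowelConsonant_spec : Claim_equal_countVowelConsonant := by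
  intro s _
  unfold Spec_countVowelConsonant countVowelConsonant countVowelConsonant_alt
  rw [pv_fold_eq]
  simp
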